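-- pv_equiv track=rewrite | github.com/NathanBland/music-monitor | src/music_monitor/mapping/paths.py | _normalize_lidarr_template
-- ===== SOURCE A (Python) =====
-- def _normalize_lidarr_template(template: str) -> str:
--     """Translate Lidarr placeholders into Python `str.format` placeholders."""
--     replacements = {
--         "{Album Title}": "{album_title}",
--         "{Release Year}": "{release_year}",
--         "{Artist Name}": "{artist_name}",
--         "{Track Title}": "{track_title}",
--         "{Medium Format}": "{medium_format}",
--         "{track:00}": "{track_number}",
--         "{medium:00}": "{medium_number}",
--     }
--
--     normalized = template
--     for source_value, target_value in replacements.items():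
--         normalized = normalized.replace(source_value, target_value)
--     return normalized
-- ===== SOURCE B (Python) =====
-- _PLACEHOLDER_TABLE = (
--     ("{Album Title}", "{album_title}"),
--     ("{Release Year}", "{release_year}"),
--     ("{Artist Name}", "{artist_name}"),
--     ("{Track Title}", "{track_title}"),
--     ("{Medium Format}", "{medium_format}"),
--     ("{track:00}", "{track_number}"),
--     ("{medium:00}", "{medium_number}"),
-- )
--
--
-- def _normalize_lidarr_template(template: str) -> str:
--     """Translate Lidarr placeholders into Python `str.format` placeholders."""
--     out = []
--     i = 0
--     n = len(template)
--     while i < n: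
--         for source_value, target_value in _PLACEHOLDER_TABLE:
--             if template.startswith(source_value, i):
--                 out.append(target_value)
--                 i += len(source_value)
--                 break
--         else:
--             out.append(template[i])
--             i += 1
--     return "".join(out)
-- ===== Notes on version B (the rewrite author's own statement) =====
-- stated objective: alternative
-- what changed: Replaces the seven sequential full-string str.replace passes with one left-to-right scan that at each position tries the placeholder table and emits either a translation or the original character, joining at the end.
import Mathlib
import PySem

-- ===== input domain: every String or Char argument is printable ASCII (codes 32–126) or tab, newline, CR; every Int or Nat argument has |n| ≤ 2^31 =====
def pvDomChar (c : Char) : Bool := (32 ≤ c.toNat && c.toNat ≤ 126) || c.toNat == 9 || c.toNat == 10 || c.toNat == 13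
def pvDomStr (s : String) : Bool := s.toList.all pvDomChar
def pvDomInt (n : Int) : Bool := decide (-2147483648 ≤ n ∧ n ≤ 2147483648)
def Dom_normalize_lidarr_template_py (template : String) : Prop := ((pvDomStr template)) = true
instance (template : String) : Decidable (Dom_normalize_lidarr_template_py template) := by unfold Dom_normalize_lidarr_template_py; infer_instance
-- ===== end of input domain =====

-- B replaces A's seven sequential full-string str.replace passes with a single left-to-right
-- scan that at each position tries the placeholder table and copies one character on no match
-- (objective: alternative structure, same result; not claimed faster).

-- ===== PORT A =====
def normalize_lidarr_template_py (template : String) : String :=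
  let replacements : List (String × String) :=
    [("{Album Title}", "{album_title}"),
     ("{Release Year}", "{release_year}"),
     ("{Artist Name}", "{artist_name}"),
     ("{Track Title}", "{track_title}"),
     ("{Medium Format}", "{medium_format}"),
     ("{track:00}", "{track_number}"),
     ("{medium:00}", "{medium_number}")]
  replacements.foldl (fun normalized p => PySem.Str.replace normalized p.1 p.2) template

-- ===== PORT B =====
-- the placeholder table of B, as character lists
def pvK1 : List Char := "{Album Title}".toList
def pvV1 : List Char := "{album_title}".toList
def pvK2 : List Char := "{Release Year}".toList
def pvV2 : List Char := "{release_year}".toList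
def pvK3 : List Char := "{Artist Name}".toList
def pvV3 : List Char := "{artist_name}".toList
def pvK4 : List Char := "{Track Title}".toList
def pvV4 : List Char := "{track_title}".toList
def pvK5 : List Char := "{Medium Format}".toList
def pvV5 : List Char := "{medium_format}".toList
def pvK6 : List Char := "{track:00}".toList
def pvV6 : List Char := "{track_number}".toList
def pvK7 : List Char := "{medium:00}".toList
def pvV7 : List Char := "{medium_number}".toList

-- B's single scan: at each position try the table in order, else copy one character
def pvScan : List Char → List Char
  | [] => []
  | c :: t =>
    if PySem.Chars.startswith (c :: t) pvK1 then pvV1 ++ pvScan (List.drop 12 t)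
    else if PySem.Chars.startswith (c :: t) pvK2 then pvV2 ++ pvScan (List.drop 13 t)
    else if PySem.Chars.startswith (c :: t) pvK3 then pvV3 ++ pvScan (List.drop 12 t)
    else if PySem.Chars.startswith (c :: t) pvK4 then pvV4 ++ pvScan (List.drop 12 t)
    else if PySem.Chars.startswith (c :: t) pvK5 then pvV5 ++ pvScan (List.drop 14 t)
    else if PySem.Chars.startswith (c :: t) pvK6 then pvV6 ++ pvScan (List.drop 9 t)
    else if PySem.Chars.startswith (c :: t) pvK7 then pvV7 ++ pvScan (List.drop 10 t)
    else c :: pvScan t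
termination_by s => s.length
decreasing_by all_goals (simp [List.length_drop]; try omega)

def normalize_lidarr_template_py_alt (template : String) : String :=
  String.ofList (pvScan template.toList)

-- ===== PRECONDITION & SPEC =====
def Spec_normalize_lidarr_template_py (template : String) (out : String) : Prop := out = normalize_lidarr_template_py_alt template
instance (template : String) (out : String) : Decidable (Spec_normalize_lidarr_template_py template out) := by unfold Spec_normalize_lidarr_template_py; infer_instance

-- ===== CLAIM (what is proved, stated in full; the proofs are below) =====
def Claim_equal_normalize_lidarr_template_py : Prop := ∀ (template : String), Dom_normalize_lidarr_template_py template → Spec_normalize_lidarr_template_py template (normalize_lidarr_template_py template)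

-- ===== LEMMAS AND PROOFS =====

-- structural model of Python's str.replace with a nonempty needle
def pvRep (k v : List Char) : List Char → List Char
  | [] => []
  | c :: t =>
    if k.isPrefixOf (c :: t) then v ++ pvRep k v (List.drop (k.length - 1) t)
    else c :: pvRep k v t
termination_by s => s.length
decreasing_by all_goals (simp [List.length_drop]; try omega)

theorem pvRep_nil (k v : List Char) : pvRep k v [] = [] := by simp [pvRep]

theorem pvRep_cons (k v : List Char) (c : Char) (t : List Char) :
    pvRep k v (c :: t) =
      if k.isPrefixOf (c :: t) then v ++ pvRep k v (List.drop (k.length - 1) t)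
      else c :: pvRep k v t := by
  rw [pvRep]

theorem pvGo_eq (k v : List Char) (hk : k ≠ []) :
    ∀ (fuel : Nat) (s acc : List Char), s.length ≤ fuel →
      PySem.Chars.replace.go k v fuel s acc = acc.reverse ++ pvRep k v s := by
  intro fuel
  induction fuel with
  | zero =>
    intro s acc hs
    have : s = [] := by cases s <;> simp_all
    subst this
    simp [PySem.Chars.replace.go, pvRep_nil]
  | succ n ih =>
    intro s acc hs
    cases s with
    | nil => simp [PySem.Chars.replace.go, pvRep_nil]
    | cons c t =>
      have hkl : 1 ≤ k.length := by cases k <;> simp_all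
      rw [PySem.Chars.replace.go]
      by_cases hp : k.isPrefixOf (c :: t)
      · have hdrop : List.drop k.length (c :: t) = List.drop (k.length - 1) t := by
          obtain ⟨a, k', rfl⟩ : ∃ a k', k = a :: k' := by
            cases k with | nil => exact absurd rfl hk | cons a k' => exact ⟨a, k', rfl⟩
          simp
        have hs' : t.length + 1 ≤ n + 1 := by simpa using hs
        have hlen : (List.drop k.length (c :: t)).length ≤ n := by
          simp only [List.length_drop, List.length_cons]; omega
        rw [if_pos hp, ih _ _ hlen, pvRep_cons, if_pos hp, hdrop]
        simp
      · have hlen : t.length ≤ n := by simpa using hs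
        rw [if_neg hp, ih _ _ hlen, pvRep_cons, if_neg hp]
        simp

theorem pvReplace_eq (k v s : List Char) (hk : k ≠ []) :
    PySem.Chars.replace s k v = pvRep k v s := by
  have : k.isEmpty = false := by cases k <;> simp_all
  rw [PySem.Chars.replace, this]
  simpa using pvGo_eq k v hk s.length s [] le_rfl

-- "the needle k can never match starting inside v0, whatever follows v0"
def pvSafe (v0 k : List Char) : Bool :=
  (List.range v0.length).all fun m =>
    (List.range k.length).any fun p =>
      decide (m + p < v0.length) && (v0[m+p]? != k[p]?)

theorem pvSafe_not_prefix {v0 k : List Char} (h : pvSafe v0 k = true) :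
    ∀ m, m < v0.length → ∀ x, ¬ k.isPrefixOf (List.drop m v0 ++ x) = true := by
  intro m hm x hp
  have hh := (List.all_eq_true.mp h) m (by simpa using hm)
  obtain ⟨p, hpmem, hpp⟩ := List.any_eq_true.mp hh
  have hpk : p < k.length := by simpa using hpmem
  simp only [Bool.and_eq_true, decide_eq_true_eq, bne_iff_ne] at hpp
  obtain ⟨hlt, hne⟩ := hpp
  obtain ⟨r, hr⟩ := List.isPrefixOf_iff_prefix.mp hp
  apply hne
  have hpd : p < (List.drop m v0).length := by simp [List.length_drop]; omega
  calc v0[m+p]? = (List.drop m v0)[p]? := by rw [List.getElem?_drop]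
    _ = (List.drop m v0 ++ x)[p]? := (List.getElem?_append_left hpd).symm
    _ = (k ++ r)[p]? := by rw [hr]
    _ = k[p]? := List.getElem?_append_left hpk

theorem pvRep_append_of (k v : List Char) :
    ∀ (v0 x : List Char), (∀ m, m < v0.length → ¬ k.isPrefixOf (List.drop m v0 ++ x) = true) →
      pvRep k v (v0 ++ x) = v0 ++ pvRep k v x := by
  intro v0
  induction v0 with
  | nil => intro x _; simp
  | cons a v0' ih =>
    intro x h
    have h0 : ¬ k.isPrefixOf (a :: (v0' ++ x)) = true := by
      have := h 0 (by simp) ; simpa using this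
    rw [List.cons_append, pvRep_cons, if_neg h0, ih x (fun m hm => by
      have := h (m+1) (by simp; omega)
      simpa using this)]
    simp

theorem pvRep_append_safe (k v v0 : List Char) (h : pvSafe v0 k = true) (x : List Char) :
    pvRep k v (v0 ++ x) = v0 ++ pvRep k v x :=
  pvRep_append_of k v v0 x (fun m hm => pvSafe_not_prefix h m hm x)

theorem pvPrefix_decomp {k s : List Char} (h : k.isPrefixOf s = true) :
    s = k ++ List.drop k.length s := by
  obtain ⟨r, hr⟩ := List.isPrefixOf_iff_prefix.mp h
  subst hr; rw [List.drop_left]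

theorem pvRep_prefix (k v s : List Char) (hk : k ≠ []) (h : k.isPrefixOf s = true) :
    pvRep k v s = v ++ pvRep k v (List.drop k.length s) := by
  obtain ⟨a, k', rfl⟩ : ∃ a k', k = a :: k' := by
    cases k with | nil => exact absurd rfl hk | cons a k' => exact ⟨a, k', rfl⟩
  cases s with
  | nil => simp [List.isPrefixOf] at h
  | cons c t =>
    rw [pvRep_cons, if_pos h]
    simp

-- w agrees with t on a prefix, and at the first disagreement w carries '{'
def pvAgree (t w : List Char) : Prop :=
  ∃ n, List.take n w = List.take n t ∧ (n = w.length ∨ w[n]? = some '{')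

theorem pvAgree_refl (t : List Char) : pvAgree t t := ⟨t.length, rfl, Or.inl rfl⟩

theorem pvRep_agree (k v : List Char) (hv : v[0]? = some '{') :
    ∀ t, pvAgree t (pvRep k v t) := by
  intro t
  induction t with
  | nil => exact ⟨0, by simp, Or.inl (by simp [pvRep_nil])⟩
  | cons c t' ih =>
    rw [pvRep_cons]
    by_cases hp : k.isPrefixOf (c :: t')
    · rw [if_pos hp]
      refine ⟨0, by simp, Or.inr ?_⟩
      have hv0 : 0 < v.length := by
        cases v with | nil => simp at hv | cons _ _ => simp
      rw [List.getElem?_append_left hv0]; exact hv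
    · rw [if_neg hp]
      obtain ⟨n, h1, h2⟩ := ih
      refine ⟨n + 1, by simpa using h1, ?_⟩
      rcases h2 with h2 | h2
      · exact Or.inl (by simp [h2])
      · exact Or.inr (by simpa using h2)

theorem pvAgree_trans {t w1 w2 : List Char} (h1 : pvAgree t w1) (h2 : pvAgree w1 w2) :
    pvAgree t w2 := by
  obtain ⟨n1, ht1, hc1⟩ := h1
  obtain ⟨n2, ht2, hc2⟩ := h2
  by_cases hle : n2 ≤ n1
  · refine ⟨n2, ?_, hc2⟩
    calc List.take n2 w2 = List.take n2 w1 := ht2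
      _ = List.take n2 (List.take n1 w1) := by rw [List.take_take, min_eq_left hle]
      _ = List.take n2 (List.take n1 t) := by rw [ht1]
      _ = List.take n2 t := by rw [List.take_take, min_eq_left hle]
  · have hlt : n1 < n2 := Nat.lt_of_not_le hle
    have htk : List.take n1 w2 = List.take n1 t := by
      calc List.take n1 w2 = List.take n1 (List.take n2 w2) := by
            rw [List.take_take, min_eq_left (le_of_lt hlt)]
        _ = List.take n1 (List.take n2 w1) := by rw [ht2]
        _ = List.take n1 w1 := by rw [List.take_take, min_eq_left (le_of_lt hlt)]
        _ = List.take n1 t := ht1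
    refine ⟨n1, htk, ?_⟩
    rcases hc1 with hc1 | hc1
    · -- n1 = w1.length : then w2 has length n1 too
      left
      have hw1 : List.take n2 w1 = w1 := List.take_of_length_le (by omega)
      have : (List.take n2 w2).length = w1.length := by rw [ht2, hw1]
      simp [List.length_take] at this
      omega
    · -- w1[n1]? = '{' propagates to w2
      right
      calc w2[n1]? = (List.take n2 w2)[n1]? := by rw [List.getElem?_take, if_pos hlt]
        _ = (List.take n2 w1)[n1]? := by rw [ht2]
        _ = w1[n1]? := by rw [List.getElem?_take, if_pos hlt]
        _ = some '{' := hc1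

theorem pvAgree_preserve_prefix {c0 : Char} {k' : List Char} (hb : '{' ∉ k')
    {c : Char} {t w : List Char} (ha : pvAgree t w)
    (hp : (c0 :: k').isPrefixOf (c :: w) = true) :
    (c0 :: k').isPrefixOf (c :: t) = true := by
  simp only [List.isPrefixOf, Bool.and_eq_true] at hp ⊢
  obtain ⟨hc, hkw⟩ := hp
  refine ⟨hc, ?_⟩
  obtain ⟨n, ht, hcond⟩ := ha
  have hkw' : k' <+: w := List.isPrefixOf_iff_prefix.mp hkw
  have hkwl : k'.length ≤ w.length := hkw'.length_le
  by_cases hn : k'.length ≤ n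
  · -- agreement region covers k'
    apply List.isPrefixOf_iff_prefix.mpr
    rw [List.prefix_iff_eq_take] at hkw' ⊢
    calc k' = List.take k'.length w := hkw'
      _ = List.take k'.length (List.take n w) := by rw [List.take_take, min_eq_left hn]
      _ = List.take k'.length (List.take n t) := by rw [ht]
      _ = List.take k'.length t := by rw [List.take_take, min_eq_left hn]
  · have hn' : n < k'.length := Nat.lt_of_not_le hn
    rcases hcond with h | h
    · have := hkwl; omega
    · -- w[n] = '{' but k'[n] ≠ '{'
      exfalso
      have : k'[n]? = w[n]? := by
        rw [List.prefix_iff_eq_take] at hkw'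
        calc k'[n]? = (List.take k'.length w)[n]? := by rw [← hkw']
          _ = w[n]? := by rw [List.getElem?_take, if_pos hn']
      rw [h] at this
      exact hb (List.mem_of_getElem? this)

-- the table and its fold (A's seven passes, at character level)
def pvPairs : List (List Char × List Char) :=
  [(pvK1, pvV1), (pvK2, pvV2), (pvK3, pvV3), (pvK4, pvV4), (pvK5, pvV5), (pvK6, pvV6), (pvK7, pvV7)]

def pvFold (P : List (List Char × List Char)) (s : List Char) : List Char :=
  P.foldl (fun n p => pvRep p.1 p.2 n) s

theorem pvFold_push (P : List (List Char × List Char)) (v0 : List Char)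
    (h : ∀ p ∈ P, pvSafe v0 p.1 = true) :
    ∀ x, pvFold P (v0 ++ x) = v0 ++ pvFold P x := by
  induction P with
  | nil => intro x; simp [pvFold]
  | cons q P' ih =>
    intro x
    have h0 := h q (by simp)
    have hrest : ∀ p ∈ P', pvSafe v0 p.1 = true := fun p hp => h p (by simp [hp])
    simp only [pvFold, List.foldl_cons]
    rw [pvRep_append_safe q.1 q.2 v0 h0 x]
    simpa [pvFold] using ih hrest (pvRep q.1 q.2 x)

theorem pvFold_match (P1 P2 : List (List Char × List Char)) (k v s : List Char)
    (hk : k ≠ []) (hpre : k.isPrefixOf s = true)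
    (h1 : ∀ p ∈ P1, pvSafe k p.1 = true) (h2 : ∀ p ∈ P2, pvSafe v p.1 = true) :
    pvFold (P1 ++ (k, v) :: P2) s = v ++ pvFold (P1 ++ (k, v) :: P2) (List.drop k.length s) := by
  have hs := pvPrefix_decomp hpre
  set rest := List.drop k.length s with hrest
  simp only [pvFold, List.foldl_append, List.foldl_cons]
  show List.foldl _ (pvRep k v (List.foldl _ s P1)) P2
     = v ++ List.foldl _ (pvRep k v (List.foldl _ rest P1)) P2
  have e1 : List.foldl (fun n p => pvRep p.1 p.2 n) s P1 = k ++ pvFold P1 rest := by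
    conv_lhs => rw [hs]
    exact pvFold_push P1 k h1 rest
  rw [e1]
  have e2 : pvRep k v (k ++ pvFold P1 rest) = v ++ pvRep k v (pvFold P1 rest) := by
    have hp : k.isPrefixOf (k ++ pvFold P1 rest) = true :=
      List.isPrefixOf_iff_prefix.mpr (List.prefix_append _ _)
    rw [pvRep_prefix k v _ hk hp, List.drop_left]
  rw [e2]
  exact pvFold_push P2 v h2 (pvRep k v (pvFold P1 rest))

theorem pvFold_nomatch (c : Char) (t : List Char) :
    ∀ (P : List (List Char × List Char)) (w : List Char),
      (∀ p ∈ P, p.1 ≠ [] ∧ p.2[0]? = some '{' ∧ '{' ∉ p.1.drop 1) →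
      pvAgree t w →
      (∀ p ∈ P, ¬ p.1.isPrefixOf (c :: t) = true) →
      pvFold P (c :: w) = c :: pvFold P w ∧ pvAgree t (pvFold P w) := by
  intro P
  induction P with
  | nil => intro w _ ha _; exact ⟨rfl, ha⟩
  | cons q P' ih =>
    intro w hks ha hnp
    obtain ⟨hkne, hv0, hbr⟩ := hks q (by simp)
    obtain ⟨c0, k', hq⟩ : ∃ c0 k', q.1 = c0 :: k' := by
      cases hq : q.1 with | nil => exact absurd hq hkne | cons a b => exact ⟨a, b, rfl⟩
    have hbr' : '{' ∉ k' := by rw [hq] at hbr; simpa using hbr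
    have hnq : ¬ q.1.isPrefixOf (c :: w) = true := by
      intro hcon
      apply hnp q (by simp)
      rw [hq] at hcon ⊢
      exact pvAgree_preserve_prefix hbr' ha hcon
    have hstep : pvRep q.1 q.2 (c :: w) = c :: pvRep q.1 q.2 w := by
      rw [pvRep_cons, if_neg hnq]
    have ha' : pvAgree t (pvRep q.1 q.2 w) := pvAgree_trans ha (pvRep_agree q.1 q.2 hv0 w)
    have := ih (pvRep q.1 q.2 w) (fun p hp => hks p (by simp [hp])) ha'
      (fun p hp => hnp p (by simp [hp]))
    simp only [pvFold, List.foldl_cons] at this ⊢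
    rw [hstep]
    exact this

-- main equivalence at character level
theorem pvMain : ∀ (n : Nat) (s : List Char), s.length ≤ n → pvFold pvPairs s = pvScan s := by
  intro n
  induction n with
  | zero =>
    intro s hs
    have : s = [] := by cases s <;> simp_all
    subst this
    simp [pvFold, pvPairs, pvScan, pvRep_nil]
  | succ n ih =>
    intro s hs
    cases s with
    | nil => simp [pvFold, pvPairs, pvScan, pvRep_nil]
    | cons c t =>
      have ht : t.length ≤ n := by simpa using hs
      have ihd : ∀ m, pvFold pvPairs (List.drop m t) = pvScan (List.drop m t) := by
        intro m
        exact ih _ (le_trans (by simp [List.length_drop]) ht)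
      rw [pvScan]
      by_cases h1 : pvK1.isPrefixOf (c :: t)
      · rw [if_pos (by simpa [PySem.Chars.startswith] using h1)]
        have hm : pvFold pvPairs (c :: t) = pvV1 ++ pvFold pvPairs (List.drop pvK1.length (c :: t)) := by
          simpa [pvPairs] using pvFold_match [] [(pvK2, pvV2), (pvK3, pvV3), (pvK4, pvV4), (pvK5, pvV5), (pvK6, pvV6), (pvK7, pvV7)] pvK1 pvV1 (c :: t) (by decide) h1 (by decide) (by decide)
        rw [hm, show List.drop pvK1.length (c :: t) = List.drop 12 t from by
          rw [show pvK1.length = 13 from by decide]; simp, ihd 12]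
      · rw [if_neg (by simpa [PySem.Chars.startswith] using h1)]
        by_cases h2 : pvK2.isPrefixOf (c :: t)
        · rw [if_pos (by simpa [PySem.Chars.startswith] using h2)]
          have hm : pvFold pvPairs (c :: t) = pvV2 ++ pvFold pvPairs (List.drop pvK2.length (c :: t)) := by
            simpa [pvPairs] using pvFold_match [(pvK1, pvV1)] [(pvK3, pvV3), (pvK4, pvV4), (pvK5, pvV5), (pvK6, pvV6), (pvK7, pvV7)] pvK2 pvV2 (c :: t) (by decide) h2 (by decide) (by decide)
          rw [hm, show List.drop pvK2.length (c :: t) = List.drop 13 t from by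
            rw [show pvK2.length = 14 from by decide]; simp, ihd 13]
        · rw [if_neg (by simpa [PySem.Chars.startswith] using h2)]
          by_cases h3 : pvK3.isPrefixOf (c :: t)
          · rw [if_pos (by simpa [PySem.Chars.startswith] using h3)]
            have hm : pvFold pvPairs (c :: t) = pvV3 ++ pvFold pvPairs (List.drop pvK3.length (c :: t)) := by
              simpa [pvPairs] using pvFold_match [(pvK1, pvV1), (pvK2, pvV2)] [(pvK4, pvV4), (pvK5, pvV5), (pvK6, pvV6), (pvK7, pvV7)] pvK3 pvV3 (c :: t) (by decide) h3 (by decide) (by decide)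
            rw [hm, show List.drop pvK3.length (c :: t) = List.drop 12 t from by
              rw [show pvK3.length = 13 from by decide]; simp, ihd 12]
          · rw [if_neg (by simpa [PySem.Chars.startswith] using h3)]
            by_cases h4 : pvK4.isPrefixOf (c :: t)
            · rw [if_pos (by simpa [PySem.Chars.startswith] using h4)]
              have hm : pvFold pvPairs (c :: t) = pvV4 ++ pvFold pvPairs (List.drop pvK4.length (c :: t)) := by
                simpa [pvPairs] using pvFold_match [(pvK1, pvV1), (pvK2, pvV2), (pvK3, pvV3)] [(pvK5, pvV5), (pvK6, pvV6), (pvK7, pvV7)] pvK4 pvV4 (c :: t) (by decide) h4 (by decide) (by decide)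
              rw [hm, show List.drop pvK4.length (c :: t) = List.drop 12 t from by
                rw [show pvK4.length = 13 from by decide]; simp, ihd 12]
            · rw [if_neg (by simpa [PySem.Chars.startswith] using h4)]
              by_cases h5 : pvK5.isPrefixOf (c :: t)
              · rw [if_pos (by simpa [PySem.Chars.startswith] using h5)]
                have hm : pvFold pvPairs (c :: t) = pvV5 ++ pvFold pvPairs (List.drop pvK5.length (c :: t)) := by
                  simpa [pvPairs] using pvFold_match [(pvK1, pvV1), (pvK2, pvV2), (pvK3, pvV3), (pvK4, pvV4)] [(pvK6, pvV6), (pvK7, pvV7)] pvK5 pvV5 (c :: t) (by decide) h5 (by decide) (by decide)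
                rw [hm, show List.drop pvK5.length (c :: t) = List.drop 14 t from by
                  rw [show pvK5.length = 15 from by decide]; simp, ihd 14]
              · rw [if_neg (by simpa [PySem.Chars.startswith] using h5)]
                by_cases h6 : pvK6.isPrefixOf (c :: t)
                · rw [if_pos (by simpa [PySem.Chars.startswith] using h6)]
                  have hm : pvFold pvPairs (c :: t) = pvV6 ++ pvFold pvPairs (List.drop pvK6.length (c :: t)) := by
                    simpa [pvPairs] using pvFold_match [(pvK1, pvV1), (pvK2, pvV2), (pvK3, pvV3), (pvK4, pvV4), (pvK5, pvV5)] [(pvK7, pvV7)] pvK6 pvV6 (c :: t) (by decide) h6 (by decide) (by decide)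
                  rw [hm, show List.drop pvK6.length (c :: t) = List.drop 9 t from by
                    rw [show pvK6.length = 10 from by decide]; simp, ihd 9]
                · rw [if_neg (by simpa [PySem.Chars.startswith] using h6)]
                  by_cases h7 : pvK7.isPrefixOf (c :: t)
                  · rw [if_pos (by simpa [PySem.Chars.startswith] using h7)]
                    have hm : pvFold pvPairs (c :: t) = pvV7 ++ pvFold pvPairs (List.drop pvK7.length (c :: t)) := by
                      simpa [pvPairs] using pvFold_match [(pvK1, pvV1), (pvK2, pvV2), (pvK3, pvV3), (pvK4, pvV4), (pvK5, pvV5), (pvK6, pvV6)] [] pvK7 pvV7 (c :: t) (by decide) h7 (by decide) (by decide)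
                    rw [hm, show List.drop pvK7.length (c :: t) = List.drop 10 t from by
                      rw [show pvK7.length = 11 from by decide]; simp, ihd 10]
                  · rw [if_neg (by simpa [PySem.Chars.startswith] using h7)]
                    have hnp : ∀ p ∈ pvPairs, ¬ p.1.isPrefixOf (c :: t) = true := by
                      intro p hp
                      simp only [pvPairs, List.mem_cons] at hp
                      rcases hp with rfl | rfl | rfl | rfl | rfl | rfl | rfl | h
                      · exact h1
                      · exact h2
                      · exact h3
                      · exact h4
                      · exact h5
                      · exact h6
                      · exact h7
                      · simp at h
                    have := pvFold_nomatch c t pvPairs t (by decide) (pvAgree_refl t) hnp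
                    rw [this.1, ih t ht]

theorem pvBridgeA (template : String) :
    normalize_lidarr_template_py template = String.ofList (pvFold pvPairs template.toList) := by
  simp only [normalize_lidarr_template_py, List.foldl_cons, List.foldl_nil]
  simp only [PySem.Str.replace, String.toList_ofList]
  simp only [pvFold, pvPairs, List.foldl_cons, List.foldl_nil]
  rw [pvReplace_eq _ _ _ (by decide), pvReplace_eq _ _ _ (by decide),
      pvReplace_eq _ _ _ (by decide), pvReplace_eq _ _ _ (by decide),
      pvReplace_eq _ _ _ (by decide), pvReplace_eq _ _ _ (by decide),
      pvReplace_eq _ _ _ (by decide)]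
  rfl

-- ===== VERDICT (by name: the statement is the Claim_ definition above) =====
theorem normalize_lidarr_template_py_spec : Claim_equal_normalize_lidarr_template_py := by
  intro template _
  unfold Spec_normalize_lidarr_template_py normalize_lidarr_template_py_alt
  rw [pvBridgeA, pvMain template.toList.length template.toList le_rfl]
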